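-- pv_equiv track=rewrite | github.com/necst/BINO | testing/statistics.py | _check_instructions
-- ===== SOURCE A (Python) =====
-- def _check_instructions(addresses_list, ranges):
--     for addr in addresses_list:
--         for range_i in ranges:
--             low = range_i[0]
--             high = range_i[1]
--             if low <= addr < high:
--                 return True
--     return False
-- ===== SOURCE B (Python) =====
-- def _check_instructions(addresses_list, ranges):
--     if not ranges:
--         return False
--     rs = sorted(ranges, key=lambda r: r[0])
--     lows = [r[0] for r in rs]
--     # prefix maxima of the upper bounds
--     cover = []
--     m = rs[0][1]
--     for r in rs:
--         if r[1] > m: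
--             m = r[1]
--         cover.append(m)
--     n = len(lows)
--     for addr in addresses_list:
--         # rightmost partition point: lo = number of lows <= addr
--         lo, hi = 0, n
--         while lo < hi:
--             mid = (lo + hi) // 2
--             if lows[mid] <= addr:
--                 lo = mid + 1
--             else:
--                 hi = mid
--         i = lo - 1
--         if i >= 0 and addr < cover[i]:
--             return True
--     return False
-- ===== Notes on version B (the rewrite author's own statement) =====
-- stated objective: alternative
-- what changed: A scans every range for every address (nested loops with early exit); B sorts the ranges by lower bound once, precomputes prefix maxima of the upper bounds, and answers each address with a hand-written binary search.
import Mathlib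
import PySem

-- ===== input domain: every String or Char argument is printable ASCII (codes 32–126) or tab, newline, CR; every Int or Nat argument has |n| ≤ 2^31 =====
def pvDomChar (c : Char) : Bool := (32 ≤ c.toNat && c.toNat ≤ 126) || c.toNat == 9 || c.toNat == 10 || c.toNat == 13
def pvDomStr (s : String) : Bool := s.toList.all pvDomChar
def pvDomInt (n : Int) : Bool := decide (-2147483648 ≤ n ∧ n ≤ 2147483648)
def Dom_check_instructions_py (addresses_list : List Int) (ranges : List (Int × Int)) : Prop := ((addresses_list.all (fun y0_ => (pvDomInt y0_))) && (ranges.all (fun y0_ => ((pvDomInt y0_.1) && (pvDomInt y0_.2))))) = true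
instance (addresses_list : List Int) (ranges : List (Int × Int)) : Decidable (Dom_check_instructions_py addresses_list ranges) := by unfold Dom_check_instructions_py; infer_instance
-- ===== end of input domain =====

-- B replaces A's nested scan (every address against every range) by a different algorithm:
-- sort the ranges once, precompute prefix maxima of the upper bounds, binary-search each address.

-- ===== PORT A =====
-- nested for-loops with early 'return True' ported as nested List.any
def check_instructions_py (addresses_list : List Int) (ranges : List (Int × Int)) : Bool :=
  addresses_list.any (fun addr =>
    ranges.any (fun range_i =>
      decide (range_i.1 ≤ addr) && decide (addr < range_i.2)))

-- ===== PORT B =====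
-- Source B's hand-written 'while lo < hi' binary search; lows[mid] is always in range when called
-- from the port below, so the .getD 0 default only totalizes the function (Python never hits it)
def pvBisect (lows : List Int) (addr lo hi : Int) : Int :=
  if h : lo < hi then
    let mid := PySem.Int.floordiv (lo + hi) 2
    if PySem.List.pyGetD lows mid 0 ≤ addr then pvBisect lows addr (mid + 1) hi
    else pvBisect lows addr lo mid
  else lo
termination_by (hi - lo).toNat
decreasing_by
  · simp only [PySem.Int.floordiv_eq_ediv_of_pos (by omega : (0:Int) < 2)]; omega
  · simp only [PySem.Int.floordiv_eq_ediv_of_pos (by omega : (0:Int) < 2)]; omega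

-- Source B's 'for r in rs: m = max(m, r[1]); cover.append(m)' loop (prefix maxima of the highs)
def pvCover (rs : List (Int × Int)) (m : Int) : List Int :=
  match rs with
  | [] => []
  | r :: t => (if r.2 > m then r.2 else m) :: pvCover t (if r.2 > m then r.2 else m)

def check_instructions_py_alt (addresses_list : List Int) (ranges : List (Int × Int)) : Bool :=
  if ranges.isEmpty then false
  else
    let rs := PySem.List.sorted ranges (fun r => r.1) false
    let lows := rs.map (fun r => r.1)
    let cover := pvCover rs (rs.headD (0, 0)).2
    addresses_list.any (fun addr =>
      let lo := pvBisect lows addr 0 (lows.length : Int)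
      decide (0 ≤ lo - 1) && decide (addr < PySem.List.pyGetD cover (lo - 1) 0))

-- ===== PRECONDITION & SPEC =====
def Spec_check_instructions_py (addresses_list : List Int) (ranges : List (Int × Int)) (out : Bool) : Prop := out = check_instructions_py_alt addresses_list ranges
instance (addresses_list : List Int) (ranges : List (Int × Int)) (out : Bool) : Decidable (Spec_check_instructions_py addresses_list ranges out) := by unfold Spec_check_instructions_py; infer_instance

-- ===== CLAIM (what is proved, stated in full; the proofs are below) =====
def Claim_equal_check_instructions_py : Prop := ∀ (addresses_list : List Int) (ranges : List (Int × Int)), Dom_check_instructions_py addresses_list ranges → Spec_check_instructions_py addresses_list ranges (check_instructions_py addresses_list ranges)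

-- ===== LEMMAS AND PROOFS =====

theorem portA_iff (addresses_list : List Int) (ranges : List (Int × Int)) :
    check_instructions_py addresses_list ranges = true ↔
      ∃ addr ∈ addresses_list, ∃ p ∈ ranges, p.1 ≤ addr ∧ addr < p.2 := by
  simp [check_instructions_py, List.any_eq_true]

theorem length_pvCover (rs : List (Int × Int)) (m : Int) : (pvCover rs m).length = rs.length := by
  induction rs generalizing m with
  | nil => rfl
  | cons r t ih => simp [pvCover, ih]

theorem pvCover_lt (a : Int) :
    ∀ (rs : List (Int × Int)) (m : Int) (i : Nat), i < rs.length →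
      (a < (pvCover rs m).getD i 0 ↔
        a < m ∨ ∃ j : Nat, j ≤ i ∧ ∃ hj : j < rs.length, a < (rs[j]'hj).2) := by
  intro rs
  induction rs with
  | nil => intro m i h; simp at h
  | cons r t ih =>
    intro m i h
    cases i with
    | zero =>
      simp only [pvCover, List.getD_cons_zero]
      constructor
      · intro hlt
        by_cases hc : r.2 > m
        · simp only [if_pos hc] at hlt
          exact Or.inr ⟨0, le_refl _, by simp, by simpa using hlt⟩
        · simp only [if_neg hc] at hlt; exact Or.inl hlt
      · rintro (hm | ⟨j, hj0, hjlt, hlt⟩)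
        · split <;> omega
        · interval_cases j
          simp only [List.getElem_cons_zero] at hlt
          split <;> omega
    | succ i' =>
      simp only [pvCover, List.getD_cons_succ]
      have ht : i' < t.length := by simpa using h
      rw [ih _ i' ht]
      constructor
      · rintro (hm | ⟨j, hji, hjlt, hlt⟩)
        · by_cases hc : r.2 > m
          · simp only [if_pos hc] at hm
            exact Or.inr ⟨0, by omega, by simp, by simpa using hm⟩
          · simp only [if_neg hc] at hm; exact Or.inl hm
        · exact Or.inr ⟨j + 1, by omega, by simpa using hjlt, by simpa using hlt⟩
      · rintro (hm | ⟨j, hji, hjlt, hlt⟩)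
        · exact Or.inl (by split <;> omega)
        · cases j with
          | zero =>
            simp only [List.getElem_cons_zero] at hlt
            exact Or.inl (by split <;> omega)
          | succ j' =>
            exact Or.inr ⟨j', by omega, by simpa using hjlt, by simpa using hlt⟩

theorem pvBisect_spec (lows : List Int) (a : Int)
    (hmono : ∀ p q : Nat, p ≤ q → q < lows.length → lows.getD p 0 ≤ lows.getD q 0) :
    ∀ (lo hi : Int), 0 ≤ lo → lo ≤ hi → hi ≤ (lows.length : Int) →
      (∀ j : Nat, (j : Int) < lo → lows.getD j 0 ≤ a) →
      (∀ j : Nat, hi ≤ (j : Int) → j < lows.length → a < lows.getD j 0) →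
      lo ≤ pvBisect lows a lo hi ∧ pvBisect lows a lo hi ≤ hi ∧
        (∀ j : Nat, (j : Int) < pvBisect lows a lo hi → lows.getD j 0 ≤ a) ∧
        (∀ j : Nat, pvBisect lows a lo hi ≤ (j : Int) → j < lows.length → a < lows.getD j 0) := by
  intro lo hi
  fun_induction pvBisect lows a lo hi with
  | case1 lo hi h mid hle ih =>
    intro h0 hlh hhl hlow hhigh
    have hmid : mid = PySem.Int.floordiv (lo + hi) 2 := rfl
    have hm2 : mid = (lo + hi) / 2 := by
      rw [hmid, PySem.Int.floordiv_eq_ediv_of_pos (by omega : (0:Int) < 2)]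
    have hlo : lo ≤ mid := by omega
    have hhi : mid < hi := by omega
    have hmn : mid.toNat < lows.length := by omega
    have hget : PySem.List.pyGetD lows mid 0 = lows.getD mid.toNat 0 :=
      PySem.List.pyGetD_of_nonneg lows 0 (by omega)
    rw [hget] at hle
    refine (ih (by omega) (by omega) hhl ?_ hhigh).imp (by omega) (fun x => x)
    intro j hj
    have hj' : j ≤ mid.toNat := by omega
    exact le_trans (hmono j mid.toNat hj' hmn) hle
  | case2 lo hi h mid hgt ih =>
    intro h0 hlh hhl hlow hhigh
    have hmid : mid = PySem.Int.floordiv (lo + hi) 2 := rfl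
    have hm2 : mid = (lo + hi) / 2 := by
      rw [hmid, PySem.Int.floordiv_eq_ediv_of_pos (by omega : (0:Int) < 2)]
    have hlo : lo ≤ mid := by omega
    have hhi : mid < hi := by omega
    have hmn : mid.toNat < lows.length := by omega
    have hget : PySem.List.pyGetD lows mid 0 = lows.getD mid.toNat 0 :=
      PySem.List.pyGetD_of_nonneg lows 0 (by omega)
    rw [hget] at hgt
    refine (ih h0 (by omega) (by omega) hlow ?_).imp (fun x => x) (fun x => x.imp (by omega) (fun y => y))
    intro j hj hjn
    have := hmono mid.toNat j (by omega) hjn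
    omega
  | case3 lo hi h =>
    intro h0 hlh hhl hlow hhigh
    exact ⟨le_refl _, by omega, hlow, fun j hj hjn => hhigh j (by omega) hjn⟩

theorem covered_iff (rs : List (Int × Int)) (hne : rs ≠ [])
    (hsort : (rs.map (fun r => r.1)).Pairwise (· ≤ ·)) (addr : Int) :
    (decide (0 ≤ pvBisect (rs.map (fun r => r.1)) addr 0 ((rs.map (fun r => r.1)).length : Int) - 1) &&
      decide (addr < PySem.List.pyGetD (pvCover rs (rs.headD (0, 0)).2)
        (pvBisect (rs.map (fun r => r.1)) addr 0 ((rs.map (fun r => r.1)).length : Int) - 1) 0)) = true ↔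
      ∃ p ∈ rs, p.1 ≤ addr ∧ addr < p.2 := by
  obtain ⟨r0, t, rfl⟩ := List.exists_cons_of_ne_nil hne
  set rs := r0 :: t
  set lows := rs.map (fun r => r.1) with hlows
  have llen : lows.length = rs.length := List.length_map ..
  have hlow_eq : ∀ (j : Nat) (h : j < rs.length), lows.getD j 0 = (rs[j]'h).1 := by
    intro j h
    rw [List.getD_eq_getElem _ _ (by omega)]
    simp [hlows]
  have hmono : ∀ p q : Nat, p ≤ q → q < lows.length → lows.getD p 0 ≤ lows.getD q 0 := by
    intro p q hpq hq
    rcases Nat.lt_or_ge p q with hlt | hge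
    · have := (List.pairwise_iff_getElem.mp hsort) p q (by omega) (by omega) hlt
      rw [List.getD_eq_getElem _ _ (by omega), List.getD_eq_getElem _ _ (by omega)]
      exact this
    · have : p = q := by omega
      subst this; exact le_refl _
  obtain ⟨hL0, hLle, P1, P2⟩ := pvBisect_spec lows addr hmono 0 (lows.length : Int)
    (le_refl _) (by omega) (le_refl _)
    (fun j hj => absurd hj (by omega))
    (fun j h1 h2 => absurd h1 (by omega))
  set L := pvBisect lows addr 0 (lows.length : Int) with hLdef
  have hcovlen : (pvCover rs (rs.headD (0, 0)).2).length = rs.length := length_pvCover ..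
  have hhead : (rs.headD (0, 0)).2 = (rs[0]'(by simp [rs])).2 := by simp [rs]
  rw [Bool.and_eq_true, decide_eq_true_eq, decide_eq_true_eq]
  constructor
  · rintro ⟨h1, h2⟩
    have hiI : ((L - 1).toNat : Int) = L - 1 := by omega
    have hi : (L - 1).toNat < rs.length := by omega
    rw [PySem.List.pyGetD_of_nonneg _ 0 h1] at h2
    rcases (pvCover_lt addr rs _ (L - 1).toNat hi).mp h2 with hm | ⟨j, hji, hjlt, hlt⟩
    · refine ⟨rs[0]'(by simp [rs]), List.getElem_mem _, ?_, by rw [← hhead]; exact hm⟩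
      have := P1 0 (by omega)
      rwa [hlow_eq 0 (by simp [rs])] at this
    · refine ⟨rs[j]'hjlt, List.getElem_mem _, ?_, hlt⟩
      have := P1 j (by omega)
      rwa [hlow_eq j hjlt] at this
  · rintro ⟨p, hp, hp1, hp2⟩
    obtain ⟨j, hj, hrsj⟩ := List.mem_iff_getElem.mp hp
    have hja : lows.getD j 0 ≤ addr := by rw [hlow_eq j hj, hrsj]; exact hp1
    have hjL : (j : Int) < L := by
      by_contra hc
      have := P2 j (by omega) (by omega)
      omega
    have h1 : (0 : Int) ≤ L - 1 := by omega
    refine ⟨h1, ?_⟩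
    rw [PySem.List.pyGetD_of_nonneg _ 0 h1]
    have hi : (L - 1).toNat < rs.length := by omega
    exact (pvCover_lt addr rs _ (L - 1).toNat hi).mpr
      (Or.inr ⟨j, by omega, hj, by rw [hrsj]; exact hp2⟩)

theorem portB_iff (addresses_list : List Int) (ranges : List (Int × Int)) :
    check_instructions_py_alt addresses_list ranges = true ↔
      ∃ addr ∈ addresses_list, ∃ p ∈ ranges, p.1 ≤ addr ∧ addr < p.2 := by
  unfold check_instructions_py_alt
  by_cases he : ranges.isEmpty
  · rw [if_pos he]
    simp [List.isEmpty_iff.mp he]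
  · rw [if_neg he]
    have hne : PySem.List.sorted ranges (fun r => r.1) false ≠ [] := by
      rw [Ne, PySem.List.sorted_eq_nil_iff]
      exact fun h => he (List.isEmpty_iff.mpr h)
    have hsort : ((PySem.List.sorted ranges (fun r => r.1) false).map (fun r => r.1)).Pairwise (· ≤ ·) :=
      PySem.List.sorted_map_key_pairwise ranges (fun r => r.1)
    simp only [List.any_eq_true]
    constructor
    · rintro ⟨addr, ha, hcond⟩
      obtain ⟨p, hp, h⟩ := (covered_iff _ hne hsort addr).mp hcond
      exact ⟨addr, ha, p, (PySem.List.mem_sorted _ _ _ _).mp hp, h⟩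
    · rintro ⟨addr, ha, p, hp, h⟩
      exact ⟨addr, ha, (covered_iff _ hne hsort addr).mpr ⟨p, (PySem.List.mem_sorted _ _ _ _).mpr hp, h⟩⟩

-- ===== VERDICT (by name: the statement is the Claim_ definition above) =====
theorem check_instructions_py_spec : Claim_equal_check_instructions_py := by
  intro addresses_list ranges _
  unfold Spec_check_instructions_py
  rw [Bool.eq_iff_iff, portA_iff, portB_iff]
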